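-- pv_equiv track=rewrite | github.com/tkfka1/CodingTest | 프로그래머스/lv3/92343. 양과 늑대/양과 늑대.py | solution
-- ===== SOURCE A (Python) =====
-- def solution(info, edges):
--     # 늑대 딕셔너리
--     info_dic = {}
--     for i in range(len(info)):
--         if info[i] == 1:
--             info_dic[i] = 1
--         else:
--             info_dic[i] = 0
--     # 트리 딕셔너리
--     edges_dic = {}
--     for i in edges:
--         if edges_dic.get(i[0]):
--             edges_dic[i[0]] = edges_dic[i[0]] + [i[1]]
--         else:
--             edges_dic[i[0]] = [i[1]]
--
--     def listsum(li):
--         goat = 0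
--         wolf = 0
--         if len(li) == len(list(set(li))):
--             for i in li:
--                 if info_dic[i] == 0:
--                     goat += 1
--                 else:
--                     wolf += 1
--         return goat,wolf
--
--     n = 0
--     maxgoat = 1
--     temp_list = [[0]]
--     while True:
--         if n == len(info):
--             break
--         n += 1
--         newtemp_list = []
--         for i in temp_list:
--             goin = []
--             for ii in i:
--                 if edges_dic.get(ii):
--                     goin = goin + edges_dic[ii]
--             for ii in list(set(goin)):
--                 res = i+[ii]
--                 g,w = listsum(res)
--                 if g > w:
--                     if maxgoat < g:
--                         maxgoat = g
--                     newtemp_list.append(res)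
--         temp_list = newtemp_list
--
--     answer = maxgoat
--
--     return answer
-- ===== SOURCE B (Python) =====
-- def solution(info, edges):
--     n = len(info)
--     if n == 0:
--         return 1
--     children = {}
--     for e in edges:
--         if e[0] in children:
--             children[e[0]] = children[e[0]] + [e[1]]
--         else:
--             children[e[0]] = [e[1]]
--     best = 1
--     g0 = 0 if info[0] == 1 else 1
--     w0 = 1 - g0
--     frontier = [(1, [0], g0, w0)]  # (mask of collected nodes, nodes in discovery order, sheep, wolves)
--     for _ in range(n):
--         nxt = []
--         seen = set()
--         for (mask, nodes, g, w) in frontier: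
--             for node in nodes:
--                 for c in children.get(node, []):
--                     if mask >> c & 1:
--                         continue
--                     new = mask | 1 << c
--                     if new in seen:
--                         continue
--                     seen.add(new)
--                     if info[c] == 1:
--                         ng, nw = g, w + 1
--                     else:
--                         ng, nw = g + 1, w
--                     if ng > nw:
--                         if ng > best:
--                             best = ng
--                         nxt.append((new, nodes + [c], ng, nw))
--         frontier = nxt
--     return best
-- ===== Notes on version B (the rewrite author's own statement) =====
-- stated objective: faster
-- what changed: Replaces A's breadth-first enumeration of all visiting sequences (every ordering of the same collected set kept and re-expanded separately) by a level-synchronous BFS over bitmask states deduplicated per level, so each set of collected nodes is expanded at most once.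
-- outside the precondition, e.g. on solution([0, 1], [[0, 1], [1, 5]]): A returns 1, B returns 1
import Mathlib
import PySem

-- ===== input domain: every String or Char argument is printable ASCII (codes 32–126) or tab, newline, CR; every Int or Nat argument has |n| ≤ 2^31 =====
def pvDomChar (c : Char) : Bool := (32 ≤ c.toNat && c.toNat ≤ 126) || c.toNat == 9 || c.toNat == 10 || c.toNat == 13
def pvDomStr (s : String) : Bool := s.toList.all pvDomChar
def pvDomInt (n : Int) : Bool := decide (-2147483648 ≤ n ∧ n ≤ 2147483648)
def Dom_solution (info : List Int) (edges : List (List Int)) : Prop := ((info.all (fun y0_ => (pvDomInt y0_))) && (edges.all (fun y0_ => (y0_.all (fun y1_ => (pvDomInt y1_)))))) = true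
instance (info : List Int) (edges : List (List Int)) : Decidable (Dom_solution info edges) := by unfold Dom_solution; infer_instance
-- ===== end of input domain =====

-- B replaces A's BFS over all visiting sequences by a BFS over bitmask states deduplicated
-- per level (each collected set expanded once); equivalence of the returned maximum is proved.

-- ===== PORT A =====
-- info_dic: node index ↦ 1 (wolf) / 0 (sheep)
def pvInfoDic (info : List Int) : PySem.Dict Int Int :=
  (PySem.List.pyRange 0 (PySem.List.len info) 1).foldl
    (fun d i => if PySem.List.pyGetD info i 0 == 1 then d.insert i 1 else d.insert i 0)
    PySem.Dict.empty

-- edges_dic: parent ↦ list of children ('if edges_dic.get(i[0]):' is Python truthiness: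
-- present AND nonempty)
def pvEdgesDic (edges : List (List Int)) : PySem.Dict Int (List Int) :=
  edges.foldl (fun d e =>
    match d.get? (PySem.List.pyGetD e 0 0) with
    | some l =>
        if l.isEmpty then d.insert (PySem.List.pyGetD e 0 0) [PySem.List.pyGetD e 1 0]
        else d.insert (PySem.List.pyGetD e 0 0) (l ++ [PySem.List.pyGetD e 1 0])
    | none => d.insert (PySem.List.pyGetD e 0 0) [PySem.List.pyGetD e 1 0])
    PySem.Dict.empty

def pvListsum (infoD : PySem.Dict Int Int) (li : List Int) : Int × Int :=
  if PySem.List.len li == PySem.List.len (PySem.Set.ofList li) then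
    li.foldl (fun (gw : Int × Int) i =>
      if infoD.getD i 0 == 0 then (gw.1 + 1, gw.2) else (gw.1, gw.2 + 1)) (0, 0)
  else (0, 0)

def solution (info : List Int) (edges : List (List Int)) : Int :=
  let infoD := pvInfoDic info
  let edgesD := pvEdgesDic edges
  let res := (PySem.List.pyRange 0 (PySem.List.len info) 1).foldl
    (fun (st : Int × List (List Int)) _ =>
      st.2.foldl
        (fun (acc : Int × List (List Int)) i =>
          let goin := i.foldl (fun g ii =>
            match edgesD.get? ii with
            | some l => if l.isEmpty then g else g ++ l
            | none => g) []
          (PySem.Set.ofList goin).foldl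
            (fun (acc2 : Int × List (List Int)) ii =>
              let r := i ++ [ii]
              let gw := pvListsum infoD r
              if gw.1 > gw.2 then
                ((if acc2.1 < gw.1 then gw.1 else acc2.1), acc2.2 ++ [r])
              else acc2)
            acc)
        (st.1, []))
    (1, [[0]])
  res.1

-- ===== PORT B =====
-- children: parent ↦ list of children ('if e[0] in children:')
def pvChildren (edges : List (List Int)) : PySem.Dict Int (List Int) :=
  edges.foldl (fun d e =>
    if d.contains (PySem.List.pyGetD e 0 0) then
      d.insert (PySem.List.pyGetD e 0 0) (d.getD (PySem.List.pyGetD e 0 0) [] ++ [PySem.List.pyGetD e 1 0])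
    else d.insert (PySem.List.pyGetD e 0 0) [PySem.List.pyGetD e 1 0])
    PySem.Dict.empty

-- masks are Python ints that stay nonnegative: represented as Nat (mask >> c & 1 = testBit);
-- a state is (mask, nodes in discovery order, sheep, wolves)
def solution_alt (info : List Int) (edges : List (List Int)) : Int :=
  let n := info.length
  if n = 0 then 1
  else
    let children := pvChildren edges
    let g0 : Int := if PySem.List.pyGetD info 0 0 == 1 then 0 else 1
    let w0 : Int := 1 - g0
    let res := (List.range n).foldl
      (fun (st : Int × List (Nat × List Int × Int × Int)) _ =>
        let r := st.2.foldl
          (fun (acc : Int × PySem.Set Nat × List (Nat × List Int × Int × Int)) s =>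
            s.2.1.foldl
              (fun acc2 node =>
                (children.getD node []).foldl
                  (fun (acc3 : Int × PySem.Set Nat × List (Nat × List Int × Int × Int)) c =>
                    if s.1.testBit c.toNat then acc3
                    else
                      let nw := s.1 ||| (1 <<< c.toNat)
                      if PySem.Set.contains acc3.2.1 nw then acc3
                      else
                        let seen := PySem.Set.add acc3.2.1 nw
                        let gw := if PySem.List.pyGetD info c 0 == 1 then (s.2.2.1, s.2.2.2 + 1)
                                  else (s.2.2.1 + 1, s.2.2.2)
                        if gw.1 > gw.2 then
                          ((if gw.1 > acc3.1 then gw.1 else acc3.1), seen,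
                           acc3.2.2 ++ [(nw, s.2.1 ++ [c], gw.1, gw.2)])
                        else (acc3.1, seen, acc3.2.2))
                  acc2)
              acc)
          (st.1, PySem.Set.empty, [])
        (r.1, r.2.2))
      (1, [(1, [0], g0, w0)])
    res.1

-- ===== PRECONDITION & SPEC =====
-- graph reachability from node 0 along the edges (saturating iteration of one BFS round)
def pvReachStep (edges : List (List Int)) (s : PySem.Set Int) : PySem.Set Int :=
  edges.foldl (fun s e =>
    if PySem.Set.contains s (PySem.List.pyGetD e 0 0) then PySem.Set.add s (PySem.List.pyGetD e 1 0)
    else s) s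

def pvReach (edges : List (List Int)) : PySem.Set Int :=
  (pvReachStep edges)^[edges.length + 2] (PySem.Set.ofList [0])

-- Pre_ excludes edge rows with fewer than 2 entries (A raises IndexError building its dict) and
-- inputs where a node reachable from the root has a child that is not a valid node index: A
-- raises KeyError whenever such a child is visited; reachable-but-pruned bad children (on which
-- A still returns 1, see cite) are excluded with them.
def Pre_solution (info : List Int) (edges : List (List Int)) : Prop :=
  ∀ e ∈ edges, 2 ≤ e.length ∧
    (PySem.List.pyGetD e 0 0 ∈ pvReach edges →
      0 ≤ PySem.List.pyGetD e 1 0 ∧ PySem.List.pyGetD e 1 0 < info.length)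
instance (info : List Int) (edges : List (List Int)) : Decidable (Pre_solution info edges) := by
  unfold Pre_solution; infer_instance

def pvWitness_solution : List Int × List (List Int) := ([0, 0, 1], [[0, 1], [1, 2]])

def Spec_solution (info : List Int) (edges : List (List Int)) (out : Int) : Prop := out = solution_alt info edges
instance (info : List Int) (edges : List (List Int)) (out : Int) : Decidable (Spec_solution info edges out) := by unfold Spec_solution; infer_instance

-- ===== CLAIM (what is proved, stated in full; the proofs are below) =====
def Claim_equal_solution : Prop := ∀ (info : List Int) (edges : List (List Int)), Dom_solution info edges → Pre_solution info edges → Spec_solution info edges (solution info edges)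

-- ===== LEMMAS AND PROOFS =====

-- proof-side copies of the two loop bodies (definitionally equal to the lambdas in the ports)
def pvStepA (info : List Int) (edges : List (List Int)) (st : Int × List (List Int)) :
    Int × List (List Int) :=
  st.2.foldl
    (fun (acc : Int × List (List Int)) i =>
      let goin := i.foldl (fun g ii =>
        match (pvEdgesDic edges).get? ii with
        | some l => if l.isEmpty then g else g ++ l
        | none => g) []
      (PySem.Set.ofList goin).foldl
        (fun (acc2 : Int × List (List Int)) ii =>
          let r := i ++ [ii]
          let gw := pvListsum (pvInfoDic info) r
          if gw.1 > gw.2 then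
            ((if acc2.1 < gw.1 then gw.1 else acc2.1), acc2.2 ++ [r])
          else acc2)
        acc)
    (st.1, [])

def pvStepB (info : List Int) (edges : List (List Int))
    (st : Int × List (Nat × List Int × Int × Int)) : Int × List (Nat × List Int × Int × Int) :=
  let r := st.2.foldl
    (fun (acc : Int × PySem.Set Nat × List (Nat × List Int × Int × Int)) s =>
      s.2.1.foldl
        (fun acc2 node =>
          (((pvChildren edges).getD node [])).foldl
            (fun (acc3 : Int × PySem.Set Nat × List (Nat × List Int × Int × Int)) c =>
              if s.1.testBit c.toNat then acc3
              else
                let nw := s.1 ||| (1 <<< c.toNat)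
                if PySem.Set.contains acc3.2.1 nw then acc3
                else
                  let seen := PySem.Set.add acc3.2.1 nw
                  let gw := if PySem.List.pyGetD info c 0 == 1 then (s.2.2.1, s.2.2.2 + 1)
                            else (s.2.2.1 + 1, s.2.2.2)
                  if gw.1 > gw.2 then
                    ((if gw.1 > acc3.1 then gw.1 else acc3.1), seen,
                     acc3.2.2 ++ [(nw, s.2.1 ++ [c], gw.1, gw.2)])
                  else (acc3.1, seen, acc3.2.2))
            acc2)
        acc)
    (st.1, PySem.Set.empty, [])
  (r.1, r.2.2)

def pvBody (info : List Int) (edges : List (List Int))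
    (acc : Int × PySem.Set Nat × List (Nat × List Int × Int × Int))
    (p : (Nat × List Int × Int × Int) × Int) : Int × PySem.Set Nat × List (Nat × List Int × Int × Int) :=
  if p.1.1.testBit p.2.toNat then acc
  else
    let nw := p.1.1 ||| (1 <<< p.2.toNat)
    if PySem.Set.contains acc.2.1 nw then acc
    else
      let seen := PySem.Set.add acc.2.1 nw
      let gw := if PySem.List.pyGetD info p.2 0 == 1 then (p.1.2.2.1, p.1.2.2.2 + 1)
                else (p.1.2.2.1 + 1, p.1.2.2.2)
      if gw.1 > gw.2 then
        ((if gw.1 > acc.1 then gw.1 else acc.1), seen,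
         acc.2.2 ++ [(nw, p.1.2.1 ++ [p.2], gw.1, gw.2)])
      else (acc.1, seen, acc.2.2)

def pvStream (edges : List (List Int)) (fr : List (Nat × List Int × Int × Int)) :
    List ((Nat × List Int × Int × Int) × Int) :=
  fr.flatMap (fun s => (s.2.1.flatMap (fun node => (pvChildren edges).getD node [])).map (fun c => (s, c)))

-- semantic values: collected candidates / extensions / sheep-wolf counts of a mask
def pvGoinOf (edges : List (List Int)) (i : List Int) : List Int :=
  i.flatMap (fun ii => (pvEdgesDic edges).getD ii [])
def pvMaskOf (l : List Int) : Nat := l.foldl (fun m x => m ||| (1 <<< x.toNat)) 0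
def pvG (info : List Int) (msk : Nat) : Int :=
  ((List.range info.length).countP (fun j => msk.testBit j && !(info.getD j (0:Int) == 1)) : Int)
def pvW (info : List Int) (msk : Nat) : Int :=
  ((List.range info.length).countP (fun j => msk.testBit j && (info.getD j (0:Int) == 1)) : Int)

def pvKeptA (info : List Int) (edges : List (List Int)) (i : List Int) : List Int :=
  (PySem.Set.ofList (pvGoinOf edges i)).filter
    (fun ii => decide ((pvListsum (pvInfoDic info) (i ++ [ii])).1 > (pvListsum (pvInfoDic info) (i ++ [ii])).2))
def pvExtA (info : List Int) (edges : List (List Int)) (i : List Int) : List (List Int) :=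
  (pvKeptA info edges i).map (fun ii => i ++ [ii])
def pvGsA (info : List Int) (edges : List (List Int)) (i : List Int) : List Int :=
  (pvKeptA info edges i).map (fun ii => (pvListsum (pvInfoDic info) (i ++ [ii])).1)

-- ---- small generic lemmas ----
lemma pv_foldl_const {a b : Type} (l : List a) (f : b -> b) (init : b) :
    l.foldl (fun s _ => f s) init = f^[l.length] init := by
  induction l generalizing init with
  | nil => rfl
  | cons x t ih => simp [List.foldl_cons, ih, Function.iterate_succ_apply]

lemma pv_testBit_one_shift (k j : Nat) : (1 <<< k).testBit j = decide (k = j) := by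
  rw [Nat.shiftLeft_eq, one_mul, Nat.testBit_two_pow]

lemma pv_testBit_maskOf_gen (l : List Int) (h : ∀ x ∈ l, 0 ≤ x) (m0 : Nat) (j : Nat) :
    ((l.foldl (fun m x => m ||| (1 <<< x.toNat)) m0).testBit j ↔ m0.testBit j ∨ (j : Int) ∈ l) := by
  induction l generalizing m0 with
  | nil => simp
  | cons x t ih =>
    rw [List.foldl_cons]
    rw [ih (fun y hy => h y (List.mem_cons_of_mem _ hy))]
    rw [Nat.testBit_or, pv_testBit_one_shift]
    have hx : 0 ≤ x := h x (List.mem_cons_self ..)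
    constructor
    · rintro (hb | hb)
      · rcases (by simpa using hb : m0.testBit j = true ∨ decide (x.toNat = j) = true) with hb' | hb'
        · exact Or.inl hb'
        · refine Or.inr (List.mem_cons.2 (Or.inl ?_))
          have := of_decide_eq_true hb'
          omega
      · exact Or.inr (List.mem_cons_of_mem _ hb)
    · rintro (hb | hb)
      · exact Or.inl (by simp [hb])
      · rcases List.mem_cons.1 hb with hb' | hb'
        · refine Or.inl ?_
          have : x.toNat = j := by omega
          simp [this]
        · exact Or.inr hb'

lemma pv_testBit_maskOf (l : List Int) (h : ∀ x ∈ l, 0 ≤ x) (j : Nat) :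
    (pvMaskOf l).testBit j ↔ (j : Int) ∈ l := by
  rw [pvMaskOf, pv_testBit_maskOf_gen l h 0 j]
  simp

lemma pv_maskOf_append (l : List Int) (x : Int) :
    pvMaskOf (l ++ [x]) = pvMaskOf l ||| (1 <<< x.toNat) := by
  simp [pvMaskOf, List.foldl_append]

-- ---- reachability lemmas ----
lemma pv_reach_foldl_superset (es : List (List Int)) :
    ∀ (s : PySem.Set Int) (x : Int), x ∈ s →
    x ∈ es.foldl (fun s e =>
      if PySem.Set.contains s (PySem.List.pyGetD e 0 0) then PySem.Set.add s (PySem.List.pyGetD e 1 0)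
      else s) s := by
  induction es with
  | nil => intro s x hx; exact hx
  | cons a t ih =>
    intro s x hx
    rw [List.foldl_cons]
    apply ih
    split
    · exact (PySem.Set.mem_add _ _ _).2 (Or.inl hx)
    · exact hx

lemma pv_reach_foldl_child (es : List (List Int)) :
    ∀ (s : PySem.Set Int) (e : List Int), e ∈ es → PySem.List.pyGetD e 0 0 ∈ s →
    PySem.List.pyGetD e 1 0 ∈ es.foldl (fun s e =>
      if PySem.Set.contains s (PySem.List.pyGetD e 0 0) then PySem.Set.add s (PySem.List.pyGetD e 1 0)
      else s) s := by
  induction es with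
  | nil => intro s e he; cases he
  | cons a t ih =>
    intro s e he hp
    rw [List.foldl_cons]
    rcases List.mem_cons.1 he with rfl | he'
    · rw [if_pos ((PySem.Set.contains_iff _ _).2 hp)]
      exact pv_reach_foldl_superset t _ _ ((PySem.Set.mem_add _ _ _).2 (Or.inr rfl))
    · apply ih _ e he'
      split
      · exact (PySem.Set.mem_add _ _ _).2 (Or.inl hp)
      · exact hp

lemma pv_reach_foldl_append (es : List (List Int)) :
    ∀ (s : PySem.Set Int), ∃ t, es.foldl (fun s e =>
      if PySem.Set.contains s (PySem.List.pyGetD e 0 0) then PySem.Set.add s (PySem.List.pyGetD e 1 0)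
      else s) s = s ++ t := by
  induction es with
  | nil => intro s; exact ⟨[], (List.append_nil s).symm⟩
  | cons a t ih =>
    intro s
    rw [List.foldl_cons]
    split
    · rw [PySem.Set.add_eq_ite]
      split
      · exact ih s
      · rcases ih (s ++ [PySem.List.pyGetD a 1 0]) with ⟨u, hu⟩
        exact ⟨[PySem.List.pyGetD a 1 0] ++ u, by rw [hu, List.append_assoc]⟩
    · exact ih s

lemma pv_reach_foldl_nodup (es : List (List Int)) :
    ∀ (s : PySem.Set Int), s.Nodup → (es.foldl (fun s e =>
      if PySem.Set.contains s (PySem.List.pyGetD e 0 0) then PySem.Set.add s (PySem.List.pyGetD e 1 0)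
      else s) s).Nodup := by
  induction es with
  | nil => intro s hs; exact hs
  | cons a t ih =>
    intro s hs
    rw [List.foldl_cons]
    apply ih
    split
    · exact PySem.Set.nodup_add _ _ hs
    · exact hs

lemma pv_reach_foldl_members (es : List (List Int)) :
    ∀ (s : PySem.Set Int) (x : Int), x ∈ es.foldl (fun s e =>
      if PySem.Set.contains s (PySem.List.pyGetD e 0 0) then PySem.Set.add s (PySem.List.pyGetD e 1 0)
      else s) s → x ∈ s ∨ ∃ e ∈ es, x = PySem.List.pyGetD e 1 0 := by
  induction es with
  | nil => intro s x hx; exact Or.inl hx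
  | cons a t ih =>
    intro s x hx
    rw [List.foldl_cons] at hx
    rcases ih _ x hx with hx' | ⟨e, he, hxe⟩
    · revert hx'
      split
      · intro hx'
        rcases (PySem.Set.mem_add _ _ _).1 hx' with hx'' | hx''
        · exact Or.inl hx''
        · exact Or.inr ⟨a, List.mem_cons_self .., hx''⟩
      · exact Or.inl
    · exact Or.inr ⟨e, List.mem_cons_of_mem _ he, hxe⟩

lemma pv_reach_iter_nodup (edges : List (List Int)) (k : Nat) :
    ((pvReachStep edges)^[k] (PySem.Set.ofList [0])).Nodup := by
  induction k with
  | zero => exact PySem.Set.nodup_ofList _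
  | succ k ih =>
    rw [Function.iterate_succ_apply']
    exact pv_reach_foldl_nodup edges _ ih

lemma pv_reach_iter_members (edges : List (List Int)) (k : Nat) (x : Int)
    (hx : x ∈ (pvReachStep edges)^[k] (PySem.Set.ofList [0])) :
    x ∈ (0 : Int) :: edges.map (fun e => PySem.List.pyGetD e 1 0) := by
  induction k generalizing x with
  | zero =>
    rcases (PySem.Set.mem_ofList _ _).1 hx with h
    rcases List.mem_singleton.1 h
    exact List.mem_cons_self ..
  | succ k ih =>
    rw [Function.iterate_succ_apply'] at hx
    rcases pv_reach_foldl_members edges _ x hx with hx' | ⟨e, he, rfl⟩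
    · exact ih x hx'
    · exact List.mem_cons_of_mem _ (List.mem_map.2 ⟨e, he, rfl⟩)

lemma pv_nodup_length_le (l1 l2 : List Int) (h : l1.Nodup) (hs : l1 ⊆ l2) :
    l1.length ≤ l2.length := by
  have h1 : l1.toFinset.card = l1.length := List.toFinset_card_of_nodup h
  have h2 : l1.toFinset ⊆ l2.toFinset := by
    intro x hx
    rw [List.mem_toFinset] at hx ⊢
    exact hs hx
  have h3 := Finset.card_le_card h2
  have h4 := l2.toFinset_card_le
  omega

lemma pv_reach_iter_length (edges : List (List Int)) (k : Nat) :
    ((pvReachStep edges)^[k] (PySem.Set.ofList [0])).length ≤ edges.length + 1 := by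
  have h := pv_nodup_length_le _ ((0 : Int) :: edges.map (fun e => PySem.List.pyGetD e 1 0))
    (pv_reach_iter_nodup edges k) (fun x hx => pv_reach_iter_members edges k x hx)
  simpa using h

lemma pv_reach_fix (edges : List (List Int)) :
    pvReachStep edges (pvReach edges) = pvReach edges := by
  have hfix : ∃ m ≤ edges.length + 1,
      pvReachStep edges ((pvReachStep edges)^[m] (PySem.Set.ofList [0]))
        = (pvReachStep edges)^[m] (PySem.Set.ofList [0]) := by
    by_contra hno
    push_neg at hno
    have grow : ∀ m, m ≤ edges.length + 2 →
        m + 1 ≤ ((pvReachStep edges)^[m] (PySem.Set.ofList [0])).length := by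
      intro m
      induction m with
      | zero => intro _; simp [PySem.Set.ofList]
      | succ m ihm =>
        intro hm
        have h1 := ihm (by omega)
        rw [Function.iterate_succ_apply']
        rcases pv_reach_foldl_append edges ((pvReachStep edges)^[m] (PySem.Set.ofList [0])) with ⟨t, ht⟩
        have hne := hno m (by omega)
        rcases t with _ | ⟨y, t'⟩
        · rw [List.append_nil] at ht
          exact absurd ht hne
        · have ht' : pvReachStep edges ((pvReachStep edges)^[m] (PySem.Set.ofList [0]))
              = (pvReachStep edges)^[m] (PySem.Set.ofList [0]) ++ y :: t' := ht
          rw [ht', List.length_append]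
          simp only [List.length_cons]
          omega
    have := grow (edges.length + 2) (le_refl _)
    have := pv_reach_iter_length edges (edges.length + 2)
    omega
  rcases hfix with ⟨m, hm, hfix⟩
  have stable : ∀ j, (pvReachStep edges)^[j] ((pvReachStep edges)^[m] (PySem.Set.ofList [0]))
      = (pvReachStep edges)^[m] (PySem.Set.ofList [0]) := by
    intro j
    induction j with
    | zero => rfl
    | succ j ihj => rw [Function.iterate_succ_apply', ihj, hfix]
  have hreach : pvReach edges = (pvReachStep edges)^[m] (PySem.Set.ofList [0]) := by
    unfold pvReach
    rw [show edges.length + 2 = (edges.length + 2 - m) + m by omega,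
      Function.iterate_add_apply]
    exact stable _
  rw [hreach, hfix]

lemma pv_reach_root (edges : List (List Int)) : (0 : Int) ∈ pvReach edges := by
  unfold pvReach
  induction (edges.length + 2) with
  | zero => exact (PySem.Set.mem_ofList _ _).2 (List.mem_singleton.2 rfl)
  | succ k ih =>
    rw [Function.iterate_succ_apply']
    exact pv_reach_foldl_superset edges _ _ ih

lemma pv_reach_closure (edges : List (List Int)) (e : List Int) (he : e ∈ edges)
    (hp : PySem.List.pyGetD e 0 0 ∈ pvReach edges) :
    PySem.List.pyGetD e 1 0 ∈ pvReach edges := by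
  rw [← pv_reach_fix edges]
  exact pv_reach_foldl_child edges _ e he hp

-- ---- dictionary lemmas ----
lemma pv_dicts_eq_gen (es : List (List Int)) :
    ∀ (d : PySem.Dict Int (List Int)), (∀ k l, d.get? k = some l → l.isEmpty = false) →
    es.foldl (fun d e => match d.get? (PySem.List.pyGetD e 0 0) with
      | some l =>
          if l.isEmpty then d.insert (PySem.List.pyGetD e 0 0) [PySem.List.pyGetD e 1 0]
          else d.insert (PySem.List.pyGetD e 0 0) (l ++ [PySem.List.pyGetD e 1 0])
      | none => d.insert (PySem.List.pyGetD e 0 0) [PySem.List.pyGetD e 1 0]) d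
    = es.foldl (fun d e => if d.contains (PySem.List.pyGetD e 0 0) then
        d.insert (PySem.List.pyGetD e 0 0)
          (d.getD (PySem.List.pyGetD e 0 0) [] ++ [PySem.List.pyGetD e 1 0])
      else d.insert (PySem.List.pyGetD e 0 0) [PySem.List.pyGetD e 1 0]) d := by
  induction es with
  | nil => intro d _; rfl
  | cons e t ih =>
    intro d hd
    rw [List.foldl_cons, List.foldl_cons]
    rcases h : d.get? (PySem.List.pyGetD e 0 0) with _ | l
    · have hcon : d.contains (PySem.List.pyGetD e 0 0) = false := by
        rw [PySem.Dict.contains_eq_isSome_get?, h]; rfl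
      simp only [hcon, Bool.false_eq_true, if_false]
      apply ih
      intro k l hkl
      rw [PySem.Dict.get?_insert] at hkl
      split at hkl
      · cases hkl; rfl
      · exact hd _ _ hkl
    · have hne : l.isEmpty = false := hd _ _ h
      have hcon : d.contains (PySem.List.pyGetD e 0 0) = true := by
        rw [PySem.Dict.contains_eq_isSome_get?, h]; rfl
      have hgd : d.getD (PySem.List.pyGetD e 0 0) [] = l := PySem.Dict.getD_of_get?_eq_some d [] h
      simp only [hne, hcon, Bool.false_eq_true, if_false, if_true, hgd]
      apply ih
      intro k l' hkl
      rw [PySem.Dict.get?_insert] at hkl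
      split at hkl
      · cases hkl; simp
      · exact hd _ _ hkl

lemma pv_dicts_eq (edges : List (List Int)) : pvEdgesDic edges = pvChildren edges := by
  unfold pvEdgesDic pvChildren
  apply pv_dicts_eq_gen
  intro k l hkl
  rw [PySem.Dict.get?_empty] at hkl
  cases hkl

lemma pv_rangeFold_getD (f : Int → Int) (m : Nat) :
    ∀ (j : Nat), j < m →
    ((PySem.List.pyRange 0 (m : Int) 1).foldl
        (fun d i => d.insert i (f i)) PySem.Dict.empty).getD (j : Int) 0 = f j := by
  induction m with
  | zero => intro j hj; omega
  | succ m ih =>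
    intro j hj
    have hcast : ((m + 1 : Nat) : Int) = (m : Int) + 1 := by push_cast; ring
    rw [hcast, PySem.List.pyRange_one_succ_right (by positivity), List.foldl_append,
      List.foldl_cons, List.foldl_nil, PySem.Dict.getD_insert]
    split
    · rename_i hjm
      have : j = m := by exact_mod_cast hjm
      rw [this]
    · rename_i hjm
      exact ih j (by omega)

lemma pv_infoDic_getD (info : List Int) (j : Nat) (hj : j < info.length) :
    (pvInfoDic info).getD (j : Int) 0 = if info.getD j 0 == 1 then 1 else 0 := by
  unfold pvInfoDic
  rw [PySem.List.len_eq]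
  have hbody : (fun (d : PySem.Dict Int Int) (i : Int) =>
      if PySem.List.pyGetD info i 0 == 1 then d.insert i 1 else d.insert i 0)
      = fun d i => d.insert i (if PySem.List.pyGetD info i 0 == 1 then 1 else 0) := by
    funext d i
    by_cases h : (PySem.List.pyGetD info i 0 == 1) = true <;> simp [h]
  rw [hbody, pv_rangeFold_getD _ _ j hj]
  simp

lemma pv_children_src (edges : List (List Int)) (k c : Int)
    (hc : c ∈ (pvChildren edges).getD k []) :
    ∃ e ∈ edges, PySem.List.pyGetD e 0 0 = k ∧ PySem.List.pyGetD e 1 0 = c := by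
  have gen : ∀ (es : List (List Int)) (d : PySem.Dict Int (List Int)),
      (∀ k c, c ∈ d.getD k ([] : List Int) → ∃ e ∈ edges, PySem.List.pyGetD e 0 0 = k ∧ PySem.List.pyGetD e 1 0 = c) →
      (∀ e ∈ es, e ∈ edges) →
      ∀ k c, c ∈ (es.foldl (fun d e => if d.contains (PySem.List.pyGetD e 0 0) then
          d.insert (PySem.List.pyGetD e 0 0)
            (d.getD (PySem.List.pyGetD e 0 0) [] ++ [PySem.List.pyGetD e 1 0])
        else d.insert (PySem.List.pyGetD e 0 0) [PySem.List.pyGetD e 1 0]) d).getD k [] →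
      ∃ e ∈ edges, PySem.List.pyGetD e 0 0 = k ∧ PySem.List.pyGetD e 1 0 = c := by
    intro es
    induction es with
    | nil => intro d hd _; exact hd
    | cons e t iht =>
      intro d hd hsub
      rw [List.foldl_cons]
      apply iht
      · intro k c hkc
        by_cases hcon : d.contains (PySem.List.pyGetD e 0 0) = true
        · simp only [hcon, if_true, PySem.Dict.getD_insert] at hkc
          split at hkc
          · rename_i hk
            subst hk
            rcases List.mem_append.1 hkc with h' | h'
            · exact hd _ _ h'
            · rcases List.mem_singleton.1 h'
              exact ⟨e, hsub e (List.mem_cons_self ..), rfl, rfl⟩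
          · exact hd _ _ hkc
        · simp only [hcon, Bool.false_eq_true, if_false, PySem.Dict.getD_insert] at hkc
          split at hkc
          · rename_i hk
            subst hk
            rcases List.mem_singleton.1 hkc
            exact ⟨e, hsub e (List.mem_cons_self ..), rfl, rfl⟩
          · exact hd _ _ hkc
      · exact fun e' he' => hsub e' (List.mem_cons_of_mem _ he')
  refine gen edges PySem.Dict.empty ?_ (fun e he => he) k c hc
  intro k c h
  rw [PySem.Dict.getD_empty] at h
  cases h

lemma pv_children_range (info : List Int) (edges : List (List Int))
    (hp : Pre_solution info edges) (k c : Int) (hk : k ∈ pvReach edges)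
    (hc : c ∈ (pvEdgesDic edges).getD k []) :
    (0 ≤ c ∧ c < (info.length : Int)) ∧ c ∈ pvReach edges := by
  rw [pv_dicts_eq] at hc
  rcases pv_children_src edges k c hc with ⟨e, he, hek, hec⟩
  have hrange := (hp e he).2 (hek ▸ hk)
  constructor
  · rw [← hec]
    exact_mod_cast hrange
  · rw [← hec]
    exact pv_reach_closure edges e he (hek ▸ hk)

-- ---- listsum lemmas ----
lemma pv_ofList_sublist (l : List Int) : (PySem.Set.ofList l).Sublist l := by
  induction l using List.reverseRecOn with
  | nil => simp
  | append_singleton xs x ih =>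
    rw [PySem.Set.ofList_append_singleton, PySem.Set.add_eq_ite]
    split
    · exact ih.trans (List.sublist_append_left _ _)
    · exact List.Sublist.append ih (List.Sublist.refl _)

lemma pv_listsum_nodup_check (l : List Int) :
    (PySem.List.len l == PySem.List.len (PySem.Set.ofList l)) = true ↔ l.Nodup := by
  rw [beq_iff_eq, PySem.List.len_eq, PySem.List.len_eq]
  constructor
  · intro h
    have hlen : (PySem.Set.ofList l).length = l.length := by exact_mod_cast h.symm
    have heq : PySem.Set.ofList l = l := (List.Sublist.length_eq (pv_ofList_sublist l)).mp hlen
    have := PySem.Set.nodup_ofList l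
    rwa [heq] at this
  · intro h
    rw [PySem.Set.ofList_eq_self_of_nodup l h]

lemma pv_listsum_not_nodup (infoD : PySem.Dict Int Int) (l : List Int) (h : ¬ l.Nodup) :
    pvListsum infoD l = (0, 0) := by
  unfold pvListsum
  rw [if_neg]
  intro hc
  exact h ((pv_listsum_nodup_check l).1 hc)

lemma pv_countP_mask (n : Nat) (l : List Int) (hn : l.Nodup)
    (hr : ∀ x ∈ l, 0 ≤ x ∧ x < (n : Int)) (p : Int → Bool) :
    l.countP p = (List.range n).countP (fun j => (pvMaskOf l).testBit j && p (j : Int)) := by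
  have hnn : ∀ x ∈ l, 0 ≤ x := fun x hx => (hr x hx).1
  have hS : l.Perm (List.map (fun j : Nat => (j : Int))
      ((List.range n).filter (fun j => (pvMaskOf l).testBit j))) := by
    rw [List.perm_ext_iff_of_nodup hn]
    · intro x
      simp only [List.mem_map, List.mem_filter, List.mem_range]
      constructor
      · intro hx
        have h0 := hnn x hx
        have h1 := (hr x hx).2
        refine ⟨x.toNat, ⟨by omega, ?_⟩, by omega⟩
        rw [pv_testBit_maskOf l hnn]
        have hx' : ((x.toNat : Nat) : Int) = x := by omega
        rwa [hx']
      · rintro ⟨j, ⟨_, hb⟩, rfl⟩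
        exact (pv_testBit_maskOf l hnn j).1 hb
    · refine List.Nodup.map ?_ (List.Nodup.filter _ (List.nodup_range))
      intro a b hab
      simpa using hab
  rw [hS.countP_eq, List.countP_map, List.countP_filter]
  apply List.countP_congr
  intro j _
  show (p ((j : Nat) : Int) && (pvMaskOf l).testBit j) = true ↔ ((pvMaskOf l).testBit j && p (j : Int)) = true
  rw [Bool.and_comm]

lemma pv_listsum_eq (info : List Int) (l : List Int) (hn : l.Nodup)
    (hr : ∀ x ∈ l, 0 ≤ x ∧ x < (info.length : Int)) :
    pvListsum (pvInfoDic info) l = (pvG info (pvMaskOf l), pvW info (pvMaskOf l)) := by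
  unfold pvListsum
  rw [if_pos ((pv_listsum_nodup_check l).2 hn)]
  rw [show (fun (gw : Int × Int) i =>
      if (pvInfoDic info).getD i 0 == 0 then (gw.1 + 1, gw.2) else (gw.1, gw.2 + 1))
      = fun (s : Int × Int) (e : Int) =>
        ((if ((pvInfoDic info).getD e 0 == 0) = true then s.1 + 1 else s.1),
         (if (!((pvInfoDic info).getD e 0 == 0)) = true then s.2 + 1 else s.2)) from by
    funext gw i
    by_cases h : ((pvInfoDic info).getD i 0 == 0) = true <;> simp [h]]
  rw [PySem.List.foldl_prod_mk
    (f := fun (s : Int) (e : Int) => if ((pvInfoDic info).getD e 0 == 0) = true then s + 1 else s)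
    (g := fun (s : Int) (e : Int) => if (!((pvInfoDic info).getD e 0 == 0)) = true then s + 1 else s)]
  rw [PySem.List.foldl_if_add_one, PySem.List.foldl_if_add_one]
  have e1 : l.countP (fun e => (pvInfoDic info).getD e 0 == 0)
      = (List.range info.length).countP (fun j => (pvMaskOf l).testBit j && !(info.getD j (0:Int) == 1)) := by
    rw [pv_countP_mask info.length l hn hr]
    apply List.countP_congr
    intro j hj
    rw [List.mem_range] at hj
    rw [pv_infoDic_getD info j hj]
    rcases hb : (info.getD j (0:Int) == 1) <;> simp [hb]
  have e2 : l.countP (fun e => !((pvInfoDic info).getD e 0 == 0))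
      = (List.range info.length).countP (fun j => (pvMaskOf l).testBit j && (info.getD j (0:Int) == 1)) := by
    rw [pv_countP_mask info.length l hn hr]
    apply List.countP_congr
    intro j hj
    rw [List.mem_range] at hj
    rw [pv_infoDic_getD info j hj]
    rcases hb : (info.getD j (0:Int) == 1) <;> simp [hb]
  rw [e1, e2]
  unfold pvG pvW
  simp

-- ---- goin characterization ----
lemma pv_goin_eq (edges : List (List Int)) (i : List Int) :
    (i.foldl (fun g ii =>
        match (pvEdgesDic edges).get? ii with
        | some l => if l.isEmpty then g else g ++ l
        | none => g) []) = pvGoinOf edges i := by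
  rw [PySem.List.foldl_congr_mem (g := fun g ii => g ++ (pvEdgesDic edges).getD ii [])]
  · rw [PySem.List.foldl_append_eq_flatMap, List.nil_append]
    rfl
  · intro g ii _
    rcases h : (pvEdgesDic edges).get? ii with _ | l
    · rw [PySem.Dict.getD_of_get?_eq_none _ _ h, List.append_nil]
    · rw [PySem.Dict.getD_of_get?_eq_some _ _ h]
      rcases l with _ | ⟨a, l'⟩
      · simp
      · rfl

-- ---- step characterizations ----
lemma pv_stepA_eq (info : List Int) (edges : List (List Int)) (st : Int × List (List Int)) :
    pvStepA info edges st
      = ((st.2.flatMap (pvGsA info edges)).foldl max st.1, st.2.flatMap (pvExtA info edges)) := by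
  unfold pvStepA
  rw [PySem.List.foldl_congr_mem
    (g := fun (acc : Int × List (List Int)) i =>
      ((pvGsA info edges i).foldl max acc.1, acc.2 ++ pvExtA info edges i))]
  · rw [PySem.List.foldl_prod_mk
      (f := fun (a : Int) i => (pvGsA info edges i).foldl max a)
      (g := fun (L : List (List Int)) i => L ++ pvExtA info edges i)]
    rw [PySem.List.foldl_append_eq_flatMap, List.nil_append, ← List.foldl_flatMap]
  · intro acc i _
    show (PySem.Set.ofList (i.foldl (fun g ii =>
        match (pvEdgesDic edges).get? ii with
        | some l => if l.isEmpty then g else g ++ l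
        | none => g) [])).foldl _ acc = _
    rw [pv_goin_eq]
    rw [PySem.List.foldl_congr_mem
      (g := fun (acc2 : Int × List (List Int)) ii =>
        if (pvListsum (pvInfoDic info) (i ++ [ii])).1 > (pvListsum (pvInfoDic info) (i ++ [ii])).2 then
          (max acc2.1 (pvListsum (pvInfoDic info) (i ++ [ii])).1, acc2.2 ++ [i ++ [ii]])
        else acc2)]
    · rw [PySem.List.foldl_ite_eq_foldl_filter
        (p := fun ii => (pvListsum (pvInfoDic info) (i ++ [ii])).1 > (pvListsum (pvInfoDic info) (i ++ [ii])).2)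
        (f := fun (acc2 : Int × List (List Int)) ii =>
          (max acc2.1 (pvListsum (pvInfoDic info) (i ++ [ii])).1, acc2.2 ++ [i ++ [ii]]))]
      rw [PySem.List.foldl_prod_mk
        (f := fun (a : Int) ii => max a (pvListsum (pvInfoDic info) (i ++ [ii])).1)
        (g := fun (L : List (List Int)) ii => L ++ [i ++ [ii]])]
      rw [PySem.List.foldl_append_singleton_eq_map, ← List.foldl_map]
      rfl
    · intro acc2 ii _
      show (if (pvListsum (pvInfoDic info) (i ++ [ii])).1 > (pvListsum (pvInfoDic info) (i ++ [ii])).2 then _ else acc2) = _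
      split
      · rw [max_def_lt]
      · rfl

lemma pv_stepB_stream (info : List Int) (edges : List (List Int))
    (st : Int × List (Nat × List Int × Int × Int)) :
    pvStepB info edges st =
      (((pvStream edges st.2).foldl (pvBody info edges) (st.1, PySem.Set.empty, [])).1,
       ((pvStream edges st.2).foldl (pvBody info edges) (st.1, PySem.Set.empty, [])).2.2) := by
  have key : st.2.foldl
      (fun (acc : Int × PySem.Set Nat × List (Nat × List Int × Int × Int)) s =>
        s.2.1.foldl
          (fun acc2 node =>
            (((pvChildren edges).getD node [])).foldl
              (fun (acc3 : Int × PySem.Set Nat × List (Nat × List Int × Int × Int)) c =>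
                if s.1.testBit c.toNat then acc3
                else
                  let nw := s.1 ||| (1 <<< c.toNat)
                  if PySem.Set.contains acc3.2.1 nw then acc3
                  else
                    let seen := PySem.Set.add acc3.2.1 nw
                    let gw := if PySem.List.pyGetD info c 0 == 1 then (s.2.2.1, s.2.2.2 + 1)
                              else (s.2.2.1 + 1, s.2.2.2)
                    if gw.1 > gw.2 then
                      ((if gw.1 > acc3.1 then gw.1 else acc3.1), seen,
                       acc3.2.2 ++ [(nw, s.2.1 ++ [c], gw.1, gw.2)])
                    else (acc3.1, seen, acc3.2.2))
              acc2)
          acc)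
      (st.1, PySem.Set.empty, [])
      = (pvStream edges st.2).foldl (pvBody info edges) (st.1, PySem.Set.empty, []) := by
    unfold pvStream
    rw [List.foldl_flatMap]
    apply PySem.List.foldl_congr_mem
    intro acc s _
    rw [List.foldl_map, List.foldl_flatMap]
    rfl
  show (((st.2.foldl _ (st.1, PySem.Set.empty, []))).1,
        ((st.2.foldl _ (st.1, PySem.Set.empty, []))).2.2) = _
  rw [key]

-- single-point update of a countP over range
lemma pv_countP_update (n a : Nat) (ha : a < n) (p p' : Nat → Bool)
    (hne : ∀ j, j ≠ a → p' j = p j) (hpa : p a = false) :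
    (List.range n).countP p' = (List.range n).countP p + (if p' a then 1 else 0) := by
  induction n with
  | zero => omega
  | succ m ih =>
    rw [List.range_succ, List.countP_append, List.countP_append]
    by_cases hm : a = m
    · subst hm
      have hcongr : (List.range a).countP p' = (List.range a).countP p := by
        apply List.countP_congr
        intro j hj
        rw [List.mem_range] at hj
        rw [hne j (by omega)]
      have hone : [a].countP p' = (if p' a then 1 else 0) := by
        rcases hp' : p' a <;> simp [List.countP_cons, hp']
      have hzero : [a].countP p = 0 := by
        simp [List.countP_cons, hpa]
      omega
    · have h1 := ih (by omega)
      have h2 : ([m].countP p') = ([m].countP p) := by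
        simp only [List.countP_cons, List.countP_nil]
        rw [hne m (fun h => hm h.symm)]
      omega

lemma pv_count_incr (info : List Int) (m : Nat) (c : Int) (h0 : 0 ≤ c)
    (h1 : c < (info.length : Int)) (hb : m.testBit c.toNat = false) :
    pvG info (m ||| 1 <<< c.toNat)
      = pvG info m + (if PySem.List.pyGetD info c 0 == 1 then 0 else 1) ∧
    pvW info (m ||| 1 <<< c.toNat)
      = pvW info m + (if PySem.List.pyGetD info c 0 == 1 then 1 else 0) := by
  have hc : c = ((c.toNat : Nat) : Int) := by omega
  have hlt : c.toNat < info.length := by omega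
  have hpg : PySem.List.pyGetD info c 0 = info.getD c.toNat 0 := by
    rw [PySem.List.pyGetD_eq_getElem info 0 h0 h1, List.getD_eq_getElem _ _ hlt]
  have hbit : ∀ j : Nat, (m ||| 1 <<< c.toNat).testBit j = (m.testBit j || decide (c.toNat = j)) := by
    intro j
    rw [Nat.testBit_or, pv_testBit_one_shift]
  constructor
  · unfold pvG
    rw [pv_countP_update info.length c.toNat hlt
      (fun j => m.testBit j && !(info.getD j (0:Int) == 1))
      (fun j => (m ||| 1 <<< c.toNat).testBit j && !(info.getD j (0:Int) == 1))
      (fun j hj => by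
        show ((m ||| 1 <<< c.toNat).testBit j && !(info.getD j (0:Int) == 1))
          = (m.testBit j && !(info.getD j (0:Int) == 1))
        rw [hbit j, decide_eq_false (fun h : c.toNat = j => hj h.symm)]
        simp)
      (by
        show (m.testBit c.toNat && !(info.getD c.toNat (0:Int) == 1)) = false
        rw [hb]
        rfl)]
    have hp'a : ((m ||| 1 <<< c.toNat).testBit c.toNat && !(info.getD c.toNat (0:Int) == 1))
        = !(info.getD c.toNat (0:Int) == 1) := by
      rw [hbit c.toNat]
      simp
    rw [hp'a, hpg]
    rcases hs : (info.getD c.toNat (0:Int) == 1) <;> simp [hs]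
  · unfold pvW
    rw [pv_countP_update info.length c.toNat hlt
      (fun j => m.testBit j && (info.getD j (0:Int) == 1))
      (fun j => (m ||| 1 <<< c.toNat).testBit j && (info.getD j (0:Int) == 1))
      (fun j hj => by
        show ((m ||| 1 <<< c.toNat).testBit j && (info.getD j (0:Int) == 1))
          = (m.testBit j && (info.getD j (0:Int) == 1))
        rw [hbit j, decide_eq_false (fun h : c.toNat = j => hj h.symm)]
        simp)
      (by
        show (m.testBit c.toNat && (info.getD c.toNat (0:Int) == 1)) = false
        rw [hb]
        rfl)]
    have hp'a : ((m ||| 1 <<< c.toNat).testBit c.toNat && (info.getD c.toNat (0:Int) == 1))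
        = (info.getD c.toNat (0:Int) == 1) := by
      rw [hbit c.toNat]
      simp
    rw [hp'a, hpg]
    rcases hs : (info.getD c.toNat (0:Int) == 1) <;> simp [hs]

lemma pv_counts_zero (info : List Int) : pvG info 0 = 0 ∧ pvW info 0 = 0 := by
  unfold pvG pvW
  simp [Nat.zero_testBit]

lemma pv_counts_base (info : List Int) (hn : 0 < info.length) :
    pvG info 1 = (if PySem.List.pyGetD info 0 0 == 1 then 0 else 1) ∧
    pvW info 1 = 1 - (if PySem.List.pyGetD info 0 0 == 1 then 0 else 1) := by
  have h := pv_count_incr info 0 0 (by omega) (by exact_mod_cast hn) (Nat.zero_testBit 0)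
  have he : ((0 : Nat) ||| 1 <<< (0 : Int).toNat) = 1 := by rfl
  rw [he] at h
  constructor
  · rw [h.1, (pv_counts_zero info).1, zero_add]
  · rw [h.2, (pv_counts_zero info).2, zero_add]
    rcases hsP : (PySem.List.pyGetD info 0 0 == 1) <;> simp [hsP]

-- the invariant carried through one level of the stream fold
lemma pv_stream_fold_spec (info : List Int) (edges : List (List Int)) :
    ∀ (L : List ((Nat × List Int × Int × Int) × Int)) (b : Int) (seen : PySem.Set Nat)
      (nxt : List (Nat × List Int × Int × Int)),
      (∀ p ∈ L, p.1.2.2.1 = pvG info p.1.1 ∧ p.1.2.2.2 = pvW info p.1.1 ∧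
        0 ≤ p.2 ∧ p.2 < (info.length : Int)) →
      (∀ m ∈ seen, pvG info m > pvW info m → (∃ t ∈ nxt, t.1 = m) ∧ pvG info m ≤ b) →
      (∀ m : Nat, m ∈ (L.foldl (pvBody info edges) (b, seen, nxt)).2.1 ↔ m ∈ seen ∨
        ∃ p ∈ L, p.1.1.testBit p.2.toNat = false ∧ m = p.1.1 ||| 1 <<< p.2.toNat) ∧
      (∀ t ∈ (L.foldl (pvBody info edges) (b, seen, nxt)).2.2, t ∈ nxt ∨
        ∃ p ∈ L, p.1.1.testBit p.2.toNat = false ∧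
          pvG info (p.1.1 ||| 1 <<< p.2.toNat) > pvW info (p.1.1 ||| 1 <<< p.2.toNat) ∧
          t = (p.1.1 ||| 1 <<< p.2.toNat, p.1.2.1 ++ [p.2],
               pvG info (p.1.1 ||| 1 <<< p.2.toNat), pvW info (p.1.1 ||| 1 <<< p.2.toNat))) ∧
      (∀ m ∈ (L.foldl (pvBody info edges) (b, seen, nxt)).2.1, pvG info m > pvW info m →
        (∃ t ∈ (L.foldl (pvBody info edges) (b, seen, nxt)).2.2, t.1 = m) ∧
        pvG info m ≤ (L.foldl (pvBody info edges) (b, seen, nxt)).1) ∧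
      b ≤ (L.foldl (pvBody info edges) (b, seen, nxt)).1 ∧
      ((L.foldl (pvBody info edges) (b, seen, nxt)).1 = b ∨
        ∃ p ∈ L, p.1.1.testBit p.2.toNat = false ∧
          pvG info (p.1.1 ||| 1 <<< p.2.toNat) > pvW info (p.1.1 ||| 1 <<< p.2.toNat) ∧
          (L.foldl (pvBody info edges) (b, seen, nxt)).1 = pvG info (p.1.1 ||| 1 <<< p.2.toNat)) := by
  intro L
  induction L with
  | nil =>
    intro b seen nxt _ hseen
    refine ⟨by simp, by simp, ?_, le_refl _, Or.inl rfl⟩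
    intro m hm hgw
    exact hseen m hm hgw
  | cons hd tl ih =>
    intro b seen nxt hL hseen
    have hL' : ∀ p ∈ tl, p.1.2.2.1 = pvG info p.1.1 ∧ p.1.2.2.2 = pvW info p.1.1 ∧
        0 ≤ p.2 ∧ p.2 < (info.length : Int) := fun p hp => hL p (List.mem_cons_of_mem _ hp)
    rcases hL hd (List.mem_cons_self ..) with ⟨hg, hw, hc0, hc1⟩
    rw [List.foldl_cons]
    by_cases hbit : hd.1.1.testBit hd.2.toNat = true
    · have hb : pvBody info edges (b, seen, nxt) hd = (b, seen, nxt) := by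
        unfold pvBody
        rw [if_pos hbit]
      rw [hb]
      rcases ih b seen nxt hL' hseen with ⟨c1, c2, c3, c4, c5⟩
      refine ⟨?_, ?_, c3, c4, ?_⟩
      · intro m
        rw [c1 m]
        constructor
        · rintro (h | ⟨p, hp, hpp⟩)
          · exact Or.inl h
          · exact Or.inr ⟨p, List.mem_cons_of_mem _ hp, hpp⟩
        · rintro (h | ⟨p, hp, hpb, hpm⟩)
          · exact Or.inl h
          · rcases List.mem_cons.1 hp with rfl | hp'
            · rw [hbit] at hpb; cases hpb
            · exact Or.inr ⟨p, hp', hpb, hpm⟩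
      · intro t ht
        rcases c2 t ht with h | ⟨p, hp, hpp⟩
        · exact Or.inl h
        · exact Or.inr ⟨p, List.mem_cons_of_mem _ hp, hpp⟩
      · rcases c5 with h | ⟨p, hp, hpp⟩
        · exact Or.inl h
        · exact Or.inr ⟨p, List.mem_cons_of_mem _ hp, hpp⟩
    · rw [Bool.not_eq_true] at hbit
      set nw := hd.1.1 ||| 1 <<< hd.2.toNat with hnw
      have hcnt := pv_count_incr info hd.1.1 hd.2 hc0 hc1 hbit
      have hgwval : (if PySem.List.pyGetD info hd.2 0 == 1 then (hd.1.2.2.1, hd.1.2.2.2 + 1)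
          else (hd.1.2.2.1 + 1, hd.1.2.2.2)) = (pvG info nw, pvW info nw) := by
        rcases hs : (PySem.List.pyGetD info hd.2 0 == 1)
        · rw [hs] at hcnt
          simp only [Bool.false_eq_true, if_false] at hcnt ⊢
          rw [hg, hw, hcnt.1, hcnt.2]
          simp
        · rw [hs] at hcnt
          simp only [if_true] at hcnt ⊢
          rw [hg, hw, hcnt.1, hcnt.2]
          simp
      by_cases hmem : PySem.Set.contains seen nw = true
      · have hmem' : nw ∈ seen := (PySem.Set.contains_iff _ _).1 hmem
        have hb : pvBody info edges (b, seen, nxt) hd = (b, seen, nxt) := by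
          unfold pvBody
          rw [if_neg (by rw [hbit]; exact Bool.false_ne_true), if_pos hmem]
        rw [hb]
        rcases ih b seen nxt hL' hseen with ⟨c1, c2, c3, c4, c5⟩
        refine ⟨?_, ?_, c3, c4, ?_⟩
        · intro m
          rw [c1 m]
          constructor
          · rintro (h | ⟨p, hp, hpp⟩)
            · exact Or.inl h
            · exact Or.inr ⟨p, List.mem_cons_of_mem _ hp, hpp⟩
          · rintro (h | ⟨p, hp, hpb, hpm⟩)
            · exact Or.inl h
            · rcases List.mem_cons.1 hp with rfl | hp'
              · exact Or.inl (hpm ▸ hmem')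
              · exact Or.inr ⟨p, hp', hpb, hpm⟩
        · intro t ht
          rcases c2 t ht with h | ⟨p, hp, hpp⟩
          · exact Or.inl h
          · exact Or.inr ⟨p, List.mem_cons_of_mem _ hp, hpp⟩
        · rcases c5 with h | ⟨p, hp, hpp⟩
          · exact Or.inl h
          · exact Or.inr ⟨p, List.mem_cons_of_mem _ hp, hpp⟩
      · by_cases hkeep : pvG info nw > pvW info nw
        · have hb : pvBody info edges (b, seen, nxt) hd
              = ((if pvG info nw > b then pvG info nw else b), PySem.Set.add seen nw,
                 nxt ++ [(nw, hd.1.2.1 ++ [hd.2], pvG info nw, pvW info nw)]) := by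
            unfold pvBody
            rw [if_neg (by rw [hbit]; exact Bool.false_ne_true), if_neg hmem]
            simp only [hgwval]
            rw [if_pos hkeep]
          rw [hb]
          set b' := if pvG info nw > b then pvG info nw else b with hb'
          have hbb' : b ≤ b' ∧ pvG info nw ≤ b' := by
            rw [hb']
            split <;> constructor <;> omega
          have hseen' : ∀ m ∈ PySem.Set.add seen nw, pvG info m > pvW info m →
              (∃ t ∈ nxt ++ [(nw, hd.1.2.1 ++ [hd.2], pvG info nw, pvW info nw)], t.1 = m) ∧
              pvG info m ≤ b' := by
            intro m hm hgwm
            rcases (PySem.Set.mem_add _ _ _).1 hm with hm' | rfl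
            · rcases hseen m hm' hgwm with ⟨⟨t, htn, htm⟩, hle⟩
              exact ⟨⟨t, List.mem_append_left _ htn, htm⟩, le_trans hle hbb'.1⟩
            · exact ⟨⟨_, List.mem_append_right _ (List.mem_singleton.2 rfl), rfl⟩, hbb'.2⟩
          rcases ih b' (PySem.Set.add seen nw)
              (nxt ++ [(nw, hd.1.2.1 ++ [hd.2], pvG info nw, pvW info nw)]) hL' hseen'
            with ⟨c1, c2, c3, c4, c5⟩
          refine ⟨?_, ?_, c3, le_trans hbb'.1 c4, ?_⟩
          · intro m
            rw [c1 m]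
            constructor
            · rintro (h | ⟨p, hp, hpp⟩)
              · rcases (PySem.Set.mem_add _ _ _).1 h with h' | rfl
                · exact Or.inl h'
                · exact Or.inr ⟨hd, List.mem_cons_self .., hbit, rfl⟩
              · exact Or.inr ⟨p, List.mem_cons_of_mem _ hp, hpp⟩
            · rintro (h | ⟨p, hp, hpb, hpm⟩)
              · exact Or.inl ((PySem.Set.mem_add _ _ _).2 (Or.inl h))
              · rcases List.mem_cons.1 hp with rfl | hp'
                · exact Or.inl ((PySem.Set.mem_add _ _ _).2 (Or.inr hpm))
                · exact Or.inr ⟨p, hp', hpb, hpm⟩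
          · intro t ht
            rcases c2 t ht with h | ⟨p, hp, hpp⟩
            · rcases List.mem_append.1 h with h' | h'
              · exact Or.inl h'
              · rcases List.mem_singleton.1 h'
                exact Or.inr ⟨hd, List.mem_cons_self .., hbit, hkeep, rfl⟩
            · exact Or.inr ⟨p, List.mem_cons_of_mem _ hp, hpp⟩
          · rcases c5 with h | ⟨p, hp, hpp⟩
            · rw [h, hb']
              split
              · exact Or.inr ⟨hd, List.mem_cons_self .., hbit, hkeep, rfl⟩
              · exact Or.inl rfl
            · exact Or.inr ⟨p, List.mem_cons_of_mem _ hp, hpp⟩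
        · have hb : pvBody info edges (b, seen, nxt) hd = (b, PySem.Set.add seen nw, nxt) := by
            unfold pvBody
            rw [if_neg (by rw [hbit]; exact Bool.false_ne_true), if_neg hmem]
            simp only [hgwval]
            rw [if_neg hkeep]
          rw [hb]
          have hseen' : ∀ m ∈ PySem.Set.add seen nw, pvG info m > pvW info m →
              (∃ t ∈ nxt, t.1 = m) ∧ pvG info m ≤ b := by
            intro m hm hgwm
            rcases (PySem.Set.mem_add _ _ _).1 hm with hm' | rfl
            · exact hseen m hm' hgwm
            · exact absurd hgwm hkeep
          rcases ih b (PySem.Set.add seen nw) nxt hL' hseen' with ⟨c1, c2, c3, c4, c5⟩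
          refine ⟨?_, ?_, c3, c4, ?_⟩
          · intro m
            rw [c1 m]
            constructor
            · rintro (h | ⟨p, hp, hpp⟩)
              · rcases (PySem.Set.mem_add _ _ _).1 h with h' | rfl
                · exact Or.inl h'
                · exact Or.inr ⟨hd, List.mem_cons_self .., hbit, rfl⟩
              · exact Or.inr ⟨p, List.mem_cons_of_mem _ hp, hpp⟩
            · rintro (h | ⟨p, hp, hpb, hpm⟩)
              · exact Or.inl ((PySem.Set.mem_add _ _ _).2 (Or.inl h))
              · rcases List.mem_cons.1 hp with rfl | hp'
                · exact Or.inl ((PySem.Set.mem_add _ _ _).2 (Or.inr hpm))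
                · exact Or.inr ⟨p, hp', hpb, hpm⟩
          · intro t ht
            rcases c2 t ht with h | ⟨p, hp, hpp⟩
            · exact Or.inl h
            · exact Or.inr ⟨p, List.mem_cons_of_mem _ hp, hpp⟩
          · rcases c5 with h | ⟨p, hp, hpp⟩
            · exact Or.inl h
            · exact Or.inr ⟨p, List.mem_cons_of_mem _ hp, hpp⟩

-- ---- the cross lemma-- ---- the cross lemma: extensions of a sequence vs extensions of its mask ----
lemma pv_crossA (info : List Int) (edges : List (List Int)) (hp : Pre_solution info edges)
    (i : List Int) (hi : i.Nodup) (hr : ∀ x ∈ i, 0 ≤ x ∧ x < (info.length : Int))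
    (hreach : ∀ x ∈ i, x ∈ pvReach edges) :
    ∀ ii ∈ pvKeptA info edges i,
      (0 ≤ ii ∧ ii < (info.length : Int)) ∧ ii ∈ pvReach edges ∧ ii ∉ i ∧ (i ++ [ii]).Nodup ∧
      pvListsum (pvInfoDic info) (i ++ [ii])
        = (pvG info (pvMaskOf i ||| 1 <<< ii.toNat), pvW info (pvMaskOf i ||| 1 <<< ii.toNat)) ∧
      pvG info (pvMaskOf i ||| 1 <<< ii.toNat) > pvW info (pvMaskOf i ||| 1 <<< ii.toNat) ∧
      (∃ node ∈ i, ii ∈ (pvChildren edges).getD node []) := by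
  have hnn : ∀ x ∈ i, 0 ≤ x := fun x hx => (hr x hx).1
  intro ii hii
  rcases List.mem_filter.1 hii with ⟨hii1, hii2⟩
  have hP : (pvListsum (pvInfoDic info) (i ++ [ii])).1 > (pvListsum (pvInfoDic info) (i ++ [ii])).2 :=
    of_decide_eq_true hii2
  have hgm : ii ∈ pvGoinOf edges i := (PySem.Set.mem_ofList _ _).1 hii1
  rcases List.mem_flatMap.1 hgm with ⟨node, hnode, hchild⟩
  rcases pv_children_range info edges hp node ii (hreach node hnode) hchild with ⟨⟨hr1, hr2⟩, hrch⟩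
  have hmem : ii ∉ i := by
    intro hmem
    have hnd : ¬ (i ++ [ii]).Nodup := by
      intro hnd
      rw [List.nodup_append] at hnd
      exact hnd.2.2 ii hmem ii (List.mem_singleton.2 rfl) rfl
    rw [pv_listsum_not_nodup _ _ hnd] at hP
    exact lt_irrefl 0 hP
  have hnd : (i ++ [ii]).Nodup := by
    rw [List.nodup_append]
    refine ⟨hi, List.nodup_singleton _, ?_⟩
    intro a ha b hb
    rcases List.mem_singleton.1 hb
    exact fun hab => hmem (hab ▸ ha)
  have hrange' : ∀ x ∈ i ++ [ii], 0 ≤ x ∧ x < (info.length : Int) := by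
    intro x hx
    rcases List.mem_append.1 hx with hx | hx
    · exact hr x hx
    · rcases List.mem_singleton.1 hx
      exact ⟨hr1, hr2⟩
  have hls : pvListsum (pvInfoDic info) (i ++ [ii])
      = (pvG info (pvMaskOf i ||| 1 <<< ii.toNat), pvW info (pvMaskOf i ||| 1 <<< ii.toNat)) := by
    rw [pv_listsum_eq info _ hnd hrange', pv_maskOf_append]
  refine ⟨⟨hr1, hr2⟩, hrch, hmem, hnd, hls, ?_, ?_⟩
  · rw [hls] at hP
    exact hP
  · rw [← pv_dicts_eq]
    exact ⟨node, hnode, hchild⟩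

lemma pv_crossB (info : List Int) (edges : List (List Int)) (hp : Pre_solution info edges)
    (i : List Int) (hi : i.Nodup) (hr : ∀ x ∈ i, 0 ≤ x ∧ x < (info.length : Int))
    (hreach : ∀ x ∈ i, x ∈ pvReach edges)
    (c : Int) (hch : ∃ node ∈ i, c ∈ (pvChildren edges).getD node [])
    (hbit : (pvMaskOf i).testBit c.toNat = false) :
    (0 ≤ c ∧ c < (info.length : Int)) ∧ c ∈ pvReach edges ∧ (i ++ [c]).Nodup ∧
    pvMaskOf (i ++ [c]) = pvMaskOf i ||| 1 <<< c.toNat ∧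
    pvListsum (pvInfoDic info) (i ++ [c])
      = (pvG info (pvMaskOf i ||| 1 <<< c.toNat), pvW info (pvMaskOf i ||| 1 <<< c.toNat)) ∧
    (pvG info (pvMaskOf i ||| 1 <<< c.toNat) > pvW info (pvMaskOf i ||| 1 <<< c.toNat) →
      c ∈ pvKeptA info edges i) := by
  have hnn : ∀ x ∈ i, 0 ≤ x := fun x hx => (hr x hx).1
  rcases hch with ⟨node, hnode, hchild⟩
  have hchild' : c ∈ (pvEdgesDic edges).getD node [] := by
    rw [pv_dicts_eq]; exact hchild
  rcases pv_children_range info edges hp node c (hreach node hnode) hchild' with ⟨⟨hr1, hr2⟩, hrch⟩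
  have hmem : c ∉ i := by
    intro hmem
    have : (pvMaskOf i).testBit c.toNat = true := by
      rw [pv_testBit_maskOf i hnn c.toNat]
      have hc : ((c.toNat : Nat) : Int) = c := by omega
      rw [hc]; exact hmem
    rw [hbit] at this; cases this
  have hnd : (i ++ [c]).Nodup := by
    rw [List.nodup_append]
    refine ⟨hi, List.nodup_singleton _, ?_⟩
    intro a ha b hb
    rcases List.mem_singleton.1 hb
    exact fun hab => hmem (hab ▸ ha)
  have hrange' : ∀ x ∈ i ++ [c], 0 ≤ x ∧ x < (info.length : Int) := by
    intro x hx
    rcases List.mem_append.1 hx with hx | hx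
    · exact hr x hx
    · rcases List.mem_singleton.1 hx
      exact ⟨hr1, hr2⟩
  have hls : pvListsum (pvInfoDic info) (i ++ [c])
      = (pvG info (pvMaskOf i ||| 1 <<< c.toNat), pvW info (pvMaskOf i ||| 1 <<< c.toNat)) := by
    rw [pv_listsum_eq info _ hnd hrange', pv_maskOf_append]
  refine ⟨⟨hr1, hr2⟩, hrch, hnd, pv_maskOf_append i c, hls, ?_⟩
  intro hgw
  unfold pvKeptA
  rw [List.mem_filter]
  constructor
  · refine (PySem.Set.mem_ofList _ _).2 (List.mem_flatMap.2 ⟨node, hnode, hchild'⟩)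
  · rw [decide_eq_true_eq, hls]
    exact hgw

lemma pv_extA_props (info : List Int) (edges : List (List Int)) (hp : Pre_solution info edges)
    (i : List Int) (hi : i.Nodup) (hr : ∀ x ∈ i, 0 ≤ x ∧ x < (info.length : Int))
    (hreach : ∀ x ∈ i, x ∈ pvReach edges) :
    ∀ r ∈ pvExtA info edges i,
      r.Nodup ∧ (∀ x ∈ r, 0 ≤ x ∧ x < (info.length : Int)) ∧ (∀ x ∈ r, x ∈ pvReach edges) := by
  intro r hrm
  rcases List.mem_map.1 hrm with ⟨ii, hii, rfl⟩
  rcases pv_crossA info edges hp i hi hr hreach ii hii with ⟨⟨hr1, hr2⟩, hrch, _, hnd, _, _, _⟩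
  refine ⟨hnd, ?_, ?_⟩
  · intro x hx
    rcases List.mem_append.1 hx with hx | hx
    · exact hr x hx
    · rcases List.mem_singleton.1 hx
      exact ⟨hr1, hr2⟩
  · intro x hx
    rcases List.mem_append.1 hx with hx | hx
    · exact hreach x hx
    · rcases List.mem_singleton.1 hx
      exact hrch

lemma pv_members_of_mask_eq (i j : List Int) (hi : ∀ x ∈ i, 0 ≤ x) (hj : ∀ x ∈ j, 0 ≤ x)
    (h : pvMaskOf i = pvMaskOf j) (x : Int) (hx : x ∈ i) : x ∈ j := by
  have h0 := hi x hx
  have hc : ((x.toNat : Nat) : Int) = x := by omega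
  have hb : (pvMaskOf i).testBit x.toNat = true := by
    rw [pv_testBit_maskOf i hi x.toNat, hc]; exact hx
  rw [h, pv_testBit_maskOf j hj x.toNat, hc] at hb
  exact hb

-- ---- the level invariant ----
def pvInv (info : List Int) (edges : List (List Int))
    (p : Int × List (List Int)) (q : Int × List (Nat × List Int × Int × Int)) : Prop :=
  p.1 = q.1 ∧
  (∀ i ∈ p.2, i.Nodup ∧ (∀ x ∈ i, 0 ≤ x ∧ x < (info.length : Int)) ∧ (∀ x ∈ i, x ∈ pvReach edges)) ∧
  (∀ s ∈ q.2, s.2.1 ∈ p.2 ∧ s.1 = pvMaskOf s.2.1 ∧ s.2.2.1 = pvG info s.1 ∧ s.2.2.2 = pvW info s.1) ∧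
  (∀ i ∈ p.2, ∃ s ∈ q.2, s.1 = pvMaskOf i)

lemma pv_inv_step (info : List Int) (edges : List (List Int)) (hp : Pre_solution info edges)
    (p : Int × List (List Int)) (q : Int × List (Nat × List Int × Int × Int))
    (h : pvInv info edges p q) :
    pvInv info edges (pvStepA info edges p) (pvStepB info edges q) := by
  obtain ⟨h1, h2, h3, h4⟩ := h
  rw [pv_stepA_eq, pv_stepB_stream]
  have hstream : ∀ pr ∈ pvStream edges q.2,
      pr.1 ∈ q.2 ∧ ∃ node ∈ pr.1.2.1, pr.2 ∈ (pvChildren edges).getD node [] := by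
    intro pr hpr
    unfold pvStream at hpr
    rcases List.mem_flatMap.1 hpr with ⟨s, hs, hin⟩
    rcases List.mem_map.1 hin with ⟨c, hcm, rfl⟩
    rcases List.mem_flatMap.1 hcm with ⟨node, hnode, hc⟩
    exact ⟨hs, node, hnode, hc⟩
  have hseqprops : ∀ s ∈ q.2, (s.2.1).Nodup ∧ (∀ x ∈ s.2.1, 0 ≤ x ∧ x < (info.length : Int)) ∧
      (∀ x ∈ s.2.1, x ∈ pvReach edges) := fun s hs => h2 _ (h3 s hs).1
  have hHL : ∀ pr ∈ pvStream edges q.2, pr.1.2.2.1 = pvG info pr.1.1 ∧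
      pr.1.2.2.2 = pvW info pr.1.1 ∧ 0 ≤ pr.2 ∧ pr.2 < (info.length : Int) := by
    intro pr hpr
    rcases hstream pr hpr with ⟨hs, node, hnode, hc⟩
    rcases h3 pr.1 hs with ⟨_, _, hg, hw⟩
    have hrch := (hseqprops pr.1 hs).2.2 node hnode
    rw [← pv_dicts_eq] at hc
    have hcr := pv_children_range info edges hp node pr.2 hrch hc
    exact ⟨hg, hw, hcr.1.1, hcr.1.2⟩
  have hseen0 : ∀ m ∈ (PySem.Set.empty : PySem.Set Nat), pvG info m > pvW info m →
      (∃ t ∈ ([] : List (Nat × List Int × Int × Int)), t.1 = m) ∧ pvG info m ≤ q.1 := by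
    intro m hm
    simp [PySem.Set.empty] at hm
  rcases pv_stream_fold_spec info edges (pvStream edges q.2) q.1 PySem.Set.empty [] hHL hseen0
    with ⟨c1, c2, c3, c4, c5⟩
  -- a kept A-side extension corresponds to a stream pair with the same new mask
  have hAtoS : ∀ i ∈ p.2, ∀ ii ∈ pvKeptA info edges i,
      ∃ pr ∈ pvStream edges q.2, pr.1.1.testBit pr.2.toNat = false ∧
        pr.1.1 ||| 1 <<< pr.2.toNat = pvMaskOf i ||| 1 <<< ii.toNat := by
    intro i hi ii hii
    rcases h4 i hi with ⟨s, hs, hmask⟩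
    rcases h2 i hi with ⟨hnodup, hrange, hrch⟩
    rcases pv_crossA info edges hp i hnodup hrange hrch ii hii with
      ⟨⟨h0ii, h1ii⟩, _, hnotmem, _, _, _, node, hnode, hchild⟩
    rcases hseqprops s hs with ⟨snodup, srange, sreach⟩
    have hmaskeq : pvMaskOf i = pvMaskOf s.2.1 := by
      rw [← hmask, (h3 s hs).2.1]
    have hmem_node : node ∈ s.2.1 :=
      pv_members_of_mask_eq i s.2.1 (fun x hx => (hrange x hx).1)
        (fun x hx => (srange x hx).1) hmaskeq node hnode
    have hbit : s.1.testBit ii.toNat = false := by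
      rw [hmask]
      rw [Bool.eq_false_iff]
      intro hb
      have := (pv_testBit_maskOf i (fun x hx => (hrange x hx).1) ii.toNat).1 hb
      have hc : ((ii.toNat : Nat) : Int) = ii := by omega
      rw [hc] at this
      exact hnotmem this
    refine ⟨(s, ii), ?_, hbit, ?_⟩
    · unfold pvStream
      exact List.mem_flatMap.2 ⟨s, hs,
        List.mem_map.2 ⟨ii, List.mem_flatMap.2 ⟨node, hmem_node, hchild⟩, rfl⟩⟩
    · show s.1 ||| 1 <<< ii.toNat = pvMaskOf i ||| 1 <<< ii.toNat
      rw [hmask]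
  refine ⟨?_, ?_, ?_, ?_⟩
  · -- the running maxima agree
    show (p.2.flatMap (pvGsA info edges)).foldl max p.1 = _
    apply le_antisymm
    · rcases PySem.List.foldl_max_mem (p.2.flatMap (pvGsA info edges)) p.1 with hA | hA
      · rw [hA, h1]; exact c4
      · rcases List.mem_flatMap.1 hA with ⟨i, hi, hvi⟩
        rcases List.mem_map.1 hvi with ⟨ii, hii, hveq⟩
        rcases h2 i hi with ⟨hnodup, hrange, hrch⟩
        rcases pv_crossA info edges hp i hnodup hrange hrch ii hii with
          ⟨_, _, _, _, hls, hgw, _⟩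
        rcases hAtoS i hi ii hii with ⟨pr, hpr, hprbit, hprm⟩
        have hmmem : (pvMaskOf i ||| 1 <<< ii.toNat) ∈
            ((pvStream edges q.2).foldl (pvBody info edges) (q.1, PySem.Set.empty, [])).2.1 :=
          (c1 _).2 (Or.inr ⟨pr, hpr, hprbit, hprm.symm⟩)
        have hle := (c3 _ hmmem hgw).2
        rw [← hveq, hls]
        exact hle
    · rcases c5 with hB | ⟨pr, hpr, hprbit, hprgw, hprval⟩
      · rw [hB, ← h1]
        exact (PySem.List.le_foldl_max _ _).1
      · rcases hstream pr hpr with ⟨hs, node, hnode, hchild⟩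
        rcases hseqprops pr.1 hs with ⟨snodup, srange, sreach⟩
        have hmaskS : pr.1.1 = pvMaskOf pr.1.2.1 := (h3 pr.1 hs).2.1
        have hcb := pv_crossB info edges hp pr.1.2.1 snodup srange sreach pr.2
          ⟨node, hnode, hchild⟩ (by rw [← hmaskS]; exact hprbit)
        have hkept := hcb.2.2.2.2.2 (by rw [← hmaskS]; exact hprgw)
        have hval : (pvListsum (pvInfoDic info) (pr.1.2.1 ++ [pr.2])).1
            = pvG info (pr.1.1 ||| 1 <<< pr.2.toNat) := by
          rw [hcb.2.2.2.2.1, hmaskS]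
        rw [hprval, ← hval]
        exact (PySem.List.le_foldl_max _ _).2 _
          (List.mem_flatMap.2 ⟨pr.1.2.1, (h3 pr.1 hs).1,
            List.mem_map.2 ⟨pr.2, hkept, rfl⟩⟩)
  · -- sequence properties of the new A level
    intro r hrm
    rcases List.mem_flatMap.1 hrm with ⟨i, hi, hri⟩
    rcases h2 i hi with ⟨hnodup, hrange, hrch⟩
    exact pv_extA_props info edges hp i hnodup hrange hrch r hri
  · -- state properties of the new B level
    intro t ht
    rcases c2 t ht with hf | ⟨pr, hpr, hprbit, hprgw, rfl⟩
    · cases hf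
    · rcases hstream pr hpr with ⟨hs, node, hnode, hchild⟩
      rcases hseqprops pr.1 hs with ⟨snodup, srange, sreach⟩
      have hmaskS : pr.1.1 = pvMaskOf pr.1.2.1 := (h3 pr.1 hs).2.1
      have hcb := pv_crossB info edges hp pr.1.2.1 snodup srange sreach pr.2
        ⟨node, hnode, hchild⟩ (by rw [← hmaskS]; exact hprbit)
      have hkept := hcb.2.2.2.2.2 (by rw [← hmaskS]; exact hprgw)
      refine ⟨?_, ?_, rfl, rfl⟩
      · exact List.mem_flatMap.2 ⟨pr.1.2.1, (h3 pr.1 hs).1,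
          List.mem_map.2 ⟨pr.2, hkept, rfl⟩⟩
      · show pr.1.1 ||| 1 <<< pr.2.toNat = pvMaskOf (pr.1.2.1 ++ [pr.2])
        rw [hcb.2.2.2.1, hmaskS]
  · -- every new A sequence has a matching new B state
    intro i' hi'
    rcases List.mem_flatMap.1 hi' with ⟨i, hi, hri⟩
    rcases List.mem_map.1 hri with ⟨ii, hii, rfl⟩
    rcases h2 i hi with ⟨hnodup, hrange, hrch⟩
    rcases pv_crossA info edges hp i hnodup hrange hrch ii hii with ⟨_, _, _, _, _, hgw, _⟩
    rcases hAtoS i hi ii hii with ⟨pr, hpr, hprbit, hprm⟩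
    have hmmem : (pvMaskOf i ||| 1 <<< ii.toNat) ∈
        ((pvStream edges q.2).foldl (pvBody info edges) (q.1, PySem.Set.empty, [])).2.1 :=
      (c1 _).2 (Or.inr ⟨pr, hpr, hprbit, hprm.symm⟩)
    rcases (c3 _ hmmem hgw).1 with ⟨t, htm, hteq⟩
    refine ⟨t, htm, ?_⟩
    rw [hteq, pv_maskOf_append]

lemma pv_inv_iterate (info : List Int) (edges : List (List Int)) (hp : Pre_solution info edges)
    (hn : 0 < info.length) (k : Nat) :
    pvInv info edges ((pvStepA info edges)^[k] (1, [[0]]))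
      ((pvStepB info edges)^[k] (1, [(1, [0],
        (if PySem.List.pyGetD info 0 0 == 1 then (0:Int) else 1),
        1 - (if PySem.List.pyGetD info 0 0 == 1 then (0:Int) else 1))])) := by
  induction k with
  | zero =>
    refine ⟨rfl, ?_, ?_, ?_⟩
    · intro i hi
      rcases List.mem_singleton.1 hi
      refine ⟨by simp, ?_, ?_⟩
      · intro x hx
        rcases List.mem_singleton.1 hx
        constructor
        · omega
        · exact_mod_cast hn
      · intro x hx
        rcases List.mem_singleton.1 hx
        exact pv_reach_root edges
    · intro s hs
      rcases List.mem_singleton.1 hs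
      refine ⟨List.mem_singleton.2 rfl, rfl, ?_, ?_⟩
      · show _ = pvG info 1
        rw [(pv_counts_base info hn).1]
      · show _ = pvW info 1
        rw [(pv_counts_base info hn).2]
    · intro i hi
      rcases List.mem_singleton.1 hi
      exact ⟨_, List.mem_singleton.2 rfl, rfl⟩
  | succ k ih =>
    rw [Function.iterate_succ_apply', Function.iterate_succ_apply']
    exact pv_inv_step info edges hp _ _ ih

lemma pv_solution_eq_iter (info : List Int) (edges : List (List Int)) :
    solution info edges = ((pvStepA info edges)^[info.length] (1, [[0]])).1 := by
  show ((PySem.List.pyRange 0 (PySem.List.len info) 1).foldl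
      (fun st _ => pvStepA info edges st) (1, [[0]])).1 = _
  rw [pv_foldl_const]
  congr 2
  simp [PySem.List.len_eq, PySem.List.length_pyRange_one]

lemma pv_solution_alt_eq_iter (info : List Int) (edges : List (List Int))
    (hn : info.length ≠ 0) :
    solution_alt info edges = ((pvStepB info edges)^[info.length] (1, [(1, [0],
      (if PySem.List.pyGetD info 0 0 == 1 then (0:Int) else 1),
      1 - (if PySem.List.pyGetD info 0 0 == 1 then (0:Int) else 1))])).1 := by
  show (if info.length = 0 then (1:Int) else _) = _
  rw [if_neg hn]
  show ((List.range info.length).foldl (fun st _ => pvStepB info edges st) _).1 = _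
  rw [pv_foldl_const, List.length_range]

-- ===== VERDICT (by name: the statement is the Claim_ definition above) =====
theorem solution_spec : Claim_equal_solution := by
  intro info edges _hdom hpre
  unfold Spec_solution
  rcases Nat.eq_zero_or_pos info.length with h0 | hpos
  · have hinfo : info = [] := List.length_eq_zero_iff.1 h0
    subst hinfo
    rfl
  · rw [pv_solution_eq_iter, pv_solution_alt_eq_iter info edges (by omega)]
    exact (pv_inv_iterate info edges hpre hpos info.length).1
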